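-- pv_equiv track=rewrite | github.com/pavan-kumar-geddapu/CSE_571_AI_Team_Project | environmentCreationScript.py | isPathAvailable
-- ===== SOURCE A (Python) =====
-- def isPathAvailable(emptyCells, wallCells, height, width):
--     """
--     check if random generated maze has path.
--     """
--     dir = ((0, -1), (0, 1), (-1, 0), (1, 0))
--     visitedCells = []
--     queue = []
--     queue.append(emptyCells[0])
--     while len(queue) > 0:
--         cell = queue.pop(0)
--         visitedCells.append(cell)
--         for _x, _y in dir:
--             x, y = _x + cell[0], _y + cell[1]
--             if 0 <= x < height and 0 <= y < width and (x, y) not in wallCells and (x, y) not in visitedCells and (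
--             x, y) not in queue:
--                 queue.append((x, y))
--
--     if len(visitedCells) != len(emptyCells):
--         return False
--     for cell in visitedCells:
--         if cell not in emptyCells:
--             return False
--     return True
-- ===== SOURCE B (Python) =====
-- def isPathAvailable(emptyCells, wallCells, height, width):
--     """
--     check if random generated maze has path.
--     """
--     start = emptyCells[0]
--     walls = set(wallCells)
--     reach = {start}
--     changed = True
--     while changed:
--         changed = False
--         for cx, cy in list(reach):
--             for dx, dy in ((0, -1), (0, 1), (-1, 0), (1, 0)):
--                 n = (dx + cx, dy + cy)
--                 if 0 <= n[0] < height and 0 <= n[1] < width and n not in walls and n not in reach: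
--                     reach.add(n)
--                     changed = True
--     empties = set(emptyCells)
--     return len(emptyCells) == len(reach) and all(c in empties for c in reach)
-- ===== Notes on version B (the rewrite author's own statement) =====
-- stated objective: alternative
-- what changed: Replaces the BFS frontier queue (pop(0) plus 'not in visitedCells/queue' list scans) by round-based fixpoint saturation of a hash set, then compares the saturated component against emptyCells; a genuinely different traversal of similar cost.
import Mathlib
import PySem

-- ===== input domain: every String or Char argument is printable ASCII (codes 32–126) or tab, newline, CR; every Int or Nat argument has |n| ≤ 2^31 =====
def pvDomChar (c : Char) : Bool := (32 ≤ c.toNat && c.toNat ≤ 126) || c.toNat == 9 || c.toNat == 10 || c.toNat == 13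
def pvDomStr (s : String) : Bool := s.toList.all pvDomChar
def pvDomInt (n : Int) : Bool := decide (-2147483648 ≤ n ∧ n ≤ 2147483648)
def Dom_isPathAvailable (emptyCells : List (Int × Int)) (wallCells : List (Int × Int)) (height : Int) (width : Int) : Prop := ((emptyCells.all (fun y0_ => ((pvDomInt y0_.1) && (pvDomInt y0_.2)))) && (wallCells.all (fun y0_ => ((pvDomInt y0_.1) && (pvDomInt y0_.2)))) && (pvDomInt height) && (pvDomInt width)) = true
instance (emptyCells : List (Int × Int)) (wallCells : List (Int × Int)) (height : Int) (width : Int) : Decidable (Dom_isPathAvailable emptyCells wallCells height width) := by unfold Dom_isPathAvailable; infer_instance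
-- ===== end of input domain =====

-- B replaces A's BFS frontier queue by round-based fixpoint saturation of a set (an
-- alternative traversal of the same component); equal return value on every
-- non-empty emptyCells (on [] both Pythons raise IndexError).

-- ===== PORT A =====
-- the dir tuple of the Python source
def pvDirs : List (Int × Int) := [(0, -1), (0, 1), (-1, 0), (1, 0)]

-- the 'while len(queue) > 0' loop of A; fuel only makes the recursion structural
-- (height.toNat * width.toNat + 2 iterations always suffice, proved below)
def pvBfsLoop (wallCells : List (Int × Int)) (height width : Int) :
    Nat → List (Int × Int) → List (Int × Int) → List (Int × Int)
  | 0, _, visitedCells => visitedCells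
  | _ + 1, [], visitedCells => visitedCells
  | fuel + 1, cell :: rest, visitedCells =>
    let visited' := visitedCells ++ [cell]
    let queue' := pvDirs.foldl (fun q d =>
      let x := d.1 + cell.1
      let y := d.2 + cell.2
      if decide (0 ≤ x) && decide (x < height) && decide (0 ≤ y) && decide (y < width)
          && !(wallCells.contains (x, y)) && !(visited'.contains (x, y)) && !(q.contains (x, y))
      then q ++ [(x, y)] else q) rest
    pvBfsLoop wallCells height width fuel queue' visited'

def isPathAvailable (emptyCells : List (Int × Int)) (wallCells : List (Int × Int)) (height : Int) (width : Int) : Bool :=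
  match emptyCells with
  | [] => false  -- Python raises IndexError here; excluded by Pre_
  | start :: _ =>
    let visitedCells := pvBfsLoop wallCells height width (height.toNat * width.toNat + 2) [start] []
    if visitedCells.length ≠ emptyCells.length then false
    else visitedCells.all (fun cell => emptyCells.contains cell)

-- ===== PORT B =====
-- one pass of B's 'for cx, cy in list(reach)' over the snapshot, growing (reach, changed)
def pvSatPass (walls : PySem.Set (Int × Int)) (height width : Int)
    (snapshot : List (Int × Int)) (acc : PySem.Set (Int × Int) × Bool) :
    PySem.Set (Int × Int) × Bool :=
  snapshot.foldl (fun acc c =>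
    pvDirs.foldl (fun acc d =>
      let n : Int × Int := (d.1 + c.1, d.2 + c.2)
      if decide (0 ≤ n.1) && decide (n.1 < height) && decide (0 ≤ n.2) && decide (n.2 < width)
          && !(PySem.Set.contains walls n) && !(PySem.Set.contains acc.1 n)
      then (PySem.Set.add acc.1 n, true) else acc) acc) acc

-- B's 'while changed' loop; fuel only makes the recursion structural (proved sufficient below)
def pvSatLoop (walls : PySem.Set (Int × Int)) (height width : Int) :
    Nat → PySem.Set (Int × Int) → PySem.Set (Int × Int)
  | 0, reach => reach
  | fuel + 1, reach =>
    let p := pvSatPass walls height width reach (reach, false)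
    if p.2 then pvSatLoop walls height width fuel p.1 else reach

def isPathAvailable_alt (emptyCells : List (Int × Int)) (wallCells : List (Int × Int)) (height : Int) (width : Int) : Bool :=
  match emptyCells with
  | [] => false  -- Python raises IndexError here; excluded by Pre_
  | start :: _ =>
    let walls := PySem.Set.ofList wallCells
    let reach := pvSatLoop walls height width (height.toNat * width.toNat + 2)
      (PySem.Set.add PySem.Set.empty start)
    decide (emptyCells.length = reach.length) && reach.all (fun c => emptyCells.contains c)

-- ===== PRECONDITION & SPEC =====
-- Pre_ excludes only emptyCells = [], on which Python A raises IndexError (emptyCells[0]).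
def Pre_isPathAvailable (emptyCells : List (Int × Int)) (wallCells : List (Int × Int)) (height : Int) (width : Int) : Prop :=
  emptyCells ≠ []
instance (emptyCells : List (Int × Int)) (wallCells : List (Int × Int)) (height : Int) (width : Int) : Decidable (Pre_isPathAvailable emptyCells wallCells height width) := by unfold Pre_isPathAvailable; infer_instance

def pvWitness_isPathAvailable : (List (Int × Int)) × (List (Int × Int)) × Int × Int :=
  ([(0, 0), (0, 1)], [(1, 0)], 2, 2)

def Spec_isPathAvailable (emptyCells : List (Int × Int)) (wallCells : List (Int × Int)) (height : Int) (width : Int) (out : Bool) : Prop := out = isPathAvailable_alt emptyCells wallCells height width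
instance (emptyCells : List (Int × Int)) (wallCells : List (Int × Int)) (height : Int) (width : Int) (out : Bool) : Decidable (Spec_isPathAvailable emptyCells wallCells height width out) := by unfold Spec_isPathAvailable; infer_instance

-- ===== CLAIM (what is proved, stated in full; the proofs are below) =====
def Claim_equal_isPathAvailable : Prop := ∀ (emptyCells : List (Int × Int)) (wallCells : List (Int × Int)) (height : Int) (width : Int), Dom_isPathAvailable emptyCells wallCells height width → Pre_isPathAvailable emptyCells wallCells height width → Spec_isPathAvailable emptyCells wallCells height width (isPathAvailable emptyCells wallCells height width)

-- ===== LEMMAS AND PROOFS =====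

def pvOkB (wallCells : List (Int × Int)) (height width : Int) (n : Int × Int) : Bool :=
  decide (0 ≤ n.1) && decide (n.1 < height) && decide (0 ≤ n.2) && decide (n.2 < width)
    && !(wallCells.contains n)

inductive pvReach (wallCells : List (Int × Int)) (height width : Int) (s : Int × Int) :
    (Int × Int) → Prop
  | base : pvReach wallCells height width s s
  | step {c d : Int × Int} : pvReach wallCells height width s c → d ∈ pvDirs →
      pvOkB wallCells height width (d.1 + c.1, d.2 + c.2) = true →
      pvReach wallCells height width s (d.1 + c.1, d.2 + c.2)

noncomputable def pvGrid (height width : Int) : Finset (Int × Int) :=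
  Finset.Icc 0 (height - 1) ×ˢ Finset.Icc 0 (width - 1)

noncomputable def pvS (height width : Int) (s : Int × Int) : Finset (Int × Int) :=
  insert s (pvGrid height width)

lemma pvS_card_le (height width : Int) (s : Int × Int) :
    (pvS height width s).card ≤ height.toNat * width.toNat + 1 := by
  have h1 : (pvS height width s).card ≤ (pvGrid height width).card + 1 :=
    Finset.card_insert_le _ _
  have h2 : (pvGrid height width).card = height.toNat * width.toNat := by
    rw [pvGrid, Finset.card_product, Int.card_Icc, Int.card_Icc]
    have e1 : (height - 1 + 1 - 0) = height := by ring
    have e2 : (width - 1 + 1 - 0) = width := by ring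
    rw [e1, e2]
  omega

lemma pvOk_mem_grid {wallCells : List (Int × Int)} {height width : Int} {n : Int × Int}
    (h : pvOkB wallCells height width n = true) : n ∈ pvGrid height width := by
  simp only [pvOkB, Bool.and_eq_true, decide_eq_true_eq] at h
  simp only [pvGrid, Finset.mem_product, Finset.mem_Icc]
  omega

lemma pv_len_le_card {S : Finset (Int × Int)} {l : List (Int × Int)} (hn : l.Nodup)
    (hs : ∀ x ∈ l, x ∈ S) : l.length ≤ S.card := by
  have hsub : l.toFinset ⊆ S := fun x hx => hs x (List.mem_toFinset.mp hx)
  have := Finset.card_le_card hsub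
  rwa [List.toFinset_card_of_nodup hn] at this

def pvStepA (wallCells : List (Int × Int)) (height width : Int) (visited' : List (Int × Int))
    (cell : Int × Int) (q : List (Int × Int)) (d : Int × Int) : List (Int × Int) :=
  let x := d.1 + cell.1
  let y := d.2 + cell.2
  if decide (0 ≤ x) && decide (x < height) && decide (0 ≤ y) && decide (y < width)
      && !(wallCells.contains (x, y)) && !(visited'.contains (x, y)) && !(q.contains (x, y))
  then q ++ [(x, y)] else q

lemma pvStepA_eq (wallCells : List (Int × Int)) (height width : Int) (visited' : List (Int × Int))
    (cell q d) : pvStepA wallCells height width visited' cell q d =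
    if pvOkB wallCells height width (d.1 + cell.1, d.2 + cell.2)
        && !(visited'.contains (d.1 + cell.1, d.2 + cell.2))
        && !(q.contains (d.1 + cell.1, d.2 + cell.2))
    then q ++ [(d.1 + cell.1, d.2 + cell.2)] else q := rfl

lemma pvBfs_fold (wallCells : List (Int × Int)) (height width : Int) (cell : Int × Int)
    (visited' : List (Int × Int)) :
    ∀ (ds : List (Int × Int)) (q0 : List (Int × Int)), (visited' ++ q0).Nodup →
    (visited' ++ ds.foldl (pvStepA wallCells height width visited' cell) q0).Nodup ∧
    (∀ x ∈ ds.foldl (pvStepA wallCells height width visited' cell) q0,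
      x ∈ q0 ∨ (∃ d ∈ ds, x = (d.1 + cell.1, d.2 + cell.2) ∧ pvOkB wallCells height width x = true)) ∧
    (∀ x ∈ q0, x ∈ ds.foldl (pvStepA wallCells height width visited' cell) q0) ∧
    (∀ d ∈ ds, pvOkB wallCells height width (d.1 + cell.1, d.2 + cell.2) = true →
      (d.1 + cell.1, d.2 + cell.2) ∈ visited' ∨
      (d.1 + cell.1, d.2 + cell.2) ∈ ds.foldl (pvStepA wallCells height width visited' cell) q0) := by
  intro ds
  induction ds with
  | nil =>
    intro q0 h
    exact ⟨h, fun x hx => Or.inl hx, fun x hx => hx, by simp⟩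
  | cons d ds ih =>
    intro q0 h
    simp only [List.foldl_cons, pvStepA_eq]
    by_cases hc : (pvOkB wallCells height width (d.1 + cell.1, d.2 + cell.2)
        && !(visited'.contains (d.1 + cell.1, d.2 + cell.2))
        && !(q0.contains (d.1 + cell.1, d.2 + cell.2))) = true
    · rw [if_pos hc]
      simp only [Bool.and_eq_true, Bool.not_eq_true'] at hc
      obtain ⟨⟨hok, hv⟩, hq⟩ := hc
      have hvmem : (d.1 + cell.1, d.2 + cell.2) ∉ visited' := by simpa using hv
      have hqmem : (d.1 + cell.1, d.2 + cell.2) ∉ q0 := by simpa using hq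
      have hnd : (visited' ++ (q0 ++ [(d.1 + cell.1, d.2 + cell.2)])).Nodup := by
        rw [List.nodup_append'] at h ⊢
        obtain ⟨h1, h2, h3⟩ := h
        refine ⟨h1, ?_, ?_⟩
        · rw [List.nodup_append']
          exact ⟨h2, List.nodup_singleton _, by intro a ha hb; simp at hb; subst hb; exact hqmem ha⟩
        · intro a ha hb
          rcases List.mem_append.mp hb with hb | hb
          · exact h3 ha hb
          · simp at hb; subst hb; exact hvmem ha
      obtain ⟨i1, i2, i3, i4⟩ := ih (q0 ++ [(d.1 + cell.1, d.2 + cell.2)]) hnd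
      refine ⟨i1, ?_, ?_, ?_⟩
      · intro x hx
        rcases i2 x hx with hx' | ⟨d', hd', he, hok'⟩
        · rcases List.mem_append.mp hx' with hx'' | hx''
          · exact Or.inl hx''
          · simp only [List.mem_singleton] at hx''; subst hx''
            exact Or.inr ⟨d, List.mem_cons_self, rfl, hok⟩
        · exact Or.inr ⟨d', List.mem_cons_of_mem _ hd', he, hok'⟩
      · intro x hx; exact i3 x (List.mem_append_left _ hx)
      · intro d' hd' hok'
        rcases List.mem_cons.mp hd' with rfl | hd''
        · exact Or.inr (i3 _ (List.mem_append_right _ (List.mem_singleton.mpr rfl)))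
        · exact i4 d' hd'' hok'
    · rw [if_neg hc]
      obtain ⟨i1, i2, i3, i4⟩ := ih q0 h
      refine ⟨i1, ?_, i3, ?_⟩
      · intro x hx
        rcases i2 x hx with hx' | ⟨d', hd', he, hok'⟩
        · exact Or.inl hx'
        · exact Or.inr ⟨d', List.mem_cons_of_mem _ hd', he, hok'⟩
      · intro d' hd' hok'
        rcases List.mem_cons.mp hd' with rfl | hd''
        · cases hv : visited'.contains (d'.1 + cell.1, d'.2 + cell.2) with
          | true => exact Or.inl (List.contains_iff_mem.mp hv)
          | false =>
            cases hq : q0.contains (d'.1 + cell.1, d'.2 + cell.2) with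
            | true => exact Or.inr (i3 _ (List.contains_iff_mem.mp hq))
            | false =>
              have h1 : (d'.1 + cell.1, d'.2 + cell.2) ∉ visited' := by simpa using hv
              have h2 : (d'.1 + cell.1, d'.2 + cell.2) ∉ q0 := by simpa using hq
              exact absurd (by simp [hok', h1, h2]) hc
        · exact i4 d' hd'' hok'

lemma pvBfs_loop_spec (wallCells : List (Int × Int)) (height width : Int) (s : Int × Int) :
    ∀ (fuel : Nat) (queue visited : List (Int × Int)),
    (visited ++ queue).Nodup →
    (∀ x ∈ visited ++ queue, x ∈ pvS height width s) →
    (∀ x ∈ visited ++ queue, pvReach wallCells height width s x) →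
    s ∈ visited ++ queue →
    (∀ c ∈ visited, ∀ d ∈ pvDirs, pvOkB wallCells height width (d.1 + c.1, d.2 + c.2) = true →
      (d.1 + c.1, d.2 + c.2) ∈ visited ++ queue) →
    (pvS height width s).card + 1 ≤ fuel + visited.length →
    (pvBfsLoop wallCells height width fuel queue visited).Nodup ∧
    (∀ x, x ∈ pvBfsLoop wallCells height width fuel queue visited ↔ pvReach wallCells height width s x) := by
  intro fuel
  induction fuel with
  | zero =>
    intro queue visited hnd hS _hR _hs _hcl hfuel
    exfalso
    have h1 : visited.length ≤ (pvS height width s).card :=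
      pv_len_le_card (List.nodup_append'.mp hnd).1 (fun x hx => hS x (List.mem_append_left _ hx))
    omega
  | succ fuel ih =>
    intro queue visited hnd hS hR hs hcl hfuel
    cases queue with
    | nil =>
      have hres : pvBfsLoop wallCells height width (fuel + 1) [] visited = visited := rfl
      rw [hres]
      refine ⟨by simpa using hnd, fun x => ⟨fun hx => hR x (by simpa using hx), fun hx => ?_⟩⟩
      induction hx with
      | base => simpa using hs
      | step hre hd hok ihx => simpa using hcl _ ihx _ hd hok
    | cons cell rest =>
      have hres : pvBfsLoop wallCells height width (fuel + 1) (cell :: rest) visited =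
          pvBfsLoop wallCells height width fuel
            (pvDirs.foldl (pvStepA wallCells height width (visited ++ [cell]) cell) rest)
            (visited ++ [cell]) := rfl
      rw [hres]
      have hnd' : ((visited ++ [cell]) ++ rest).Nodup := by
        simpa [List.append_assoc] using hnd
      obtain ⟨f1, f2, f3, f4⟩ :=
        pvBfs_fold wallCells height width cell (visited ++ [cell]) pvDirs rest hnd'
      have hmold : ∀ x : Int × Int, (x ∈ visited ∨ x = cell ∨ x ∈ rest) →
          x ∈ visited ++ cell :: rest := by
        intro x hx; simp only [List.mem_append, List.mem_cons]; tauto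
      have hmnew : ∀ x : Int × Int,
          x ∈ (visited ++ [cell]) ++ pvDirs.foldl (pvStepA wallCells height width (visited ++ [cell]) cell) rest →
          (x ∈ visited ∨ x = cell ∨ x ∈ rest) ∨ pvOkB wallCells height width x = true := by
        intro x hx
        rcases List.mem_append.mp hx with hx | hx
        · rcases List.mem_append.mp hx with hx | hx
          · exact Or.inl (Or.inl hx)
          · exact Or.inl (Or.inr (Or.inl (List.mem_singleton.mp hx)))
        · rcases f2 x hx with hx | ⟨d, _, he, hok⟩
          · exact Or.inl (Or.inr (Or.inr hx))
          · exact Or.inr hok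
      apply ih
      · exact f1
      · intro x hx
        rcases hmnew x hx with hx' | hok
        · exact hS x (hmold x hx')
        · exact Finset.mem_insert_of_mem (pvOk_mem_grid hok)
      · intro x hx
        rcases List.mem_append.mp hx with hx | hx
        · rcases List.mem_append.mp hx with hx | hx
          · exact hR x (List.mem_append_left _ hx)
          · rw [List.mem_singleton.mp hx]; exact hR cell (hmold cell (Or.inr (Or.inl rfl)))
        · rcases f2 x hx with hx' | ⟨d, hd, he, hok⟩
          · exact hR x (hmold x (Or.inr (Or.inr hx')))
          · subst he
            exact pvReach.step (hR cell (hmold cell (Or.inr (Or.inl rfl)))) hd hok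
      · rcases List.mem_append.mp hs with hx | hx
        · exact List.mem_append_left _ (List.mem_append_left _ hx)
        · rcases List.mem_cons.mp hx with hx | hx
          · exact List.mem_append_left _ (List.mem_append_right _ (by simp [hx]))
          · exact List.mem_append_right _ (f3 s hx)
      · intro c hc d hd hok
        rcases List.mem_append.mp hc with hc | hc
        · have := hcl c hc d hd hok
          rcases List.mem_append.mp this with hx | hx
          · exact List.mem_append_left _ (List.mem_append_left _ hx)
          · rcases List.mem_cons.mp hx with hx | hx
            · exact List.mem_append_left _ (List.mem_append_right _ (by simp [hx]))
            · exact List.mem_append_right _ (f3 _ hx)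
        · rw [List.mem_singleton.mp hc] at hok ⊢
          rcases f4 d hd hok with hx | hx
          · exact List.mem_append_left _ hx
          · exact List.mem_append_right _ hx
      · simp only [List.length_append, List.length_singleton]
        omega

def pvStepB (walls : PySem.Set (Int × Int)) (height width : Int) (c : Int × Int)
    (acc : PySem.Set (Int × Int) × Bool) (d : Int × Int) : PySem.Set (Int × Int) × Bool :=
  let n : Int × Int := (d.1 + c.1, d.2 + c.2)
  if decide (0 ≤ n.1) && decide (n.1 < height) && decide (0 ≤ n.2) && decide (n.2 < width)
      && !(PySem.Set.contains walls n) && !(PySem.Set.contains acc.1 n)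
  then (PySem.Set.add acc.1 n, true) else acc

lemma pvSat_inner (walls : PySem.Set (Int × Int)) (wallCells : List (Int × Int))
    (height width : Int) (hw : ∀ n, PySem.Set.contains walls n = wallCells.contains n)
    (c : Int × Int) :
    ∀ (ds : List (Int × Int)) (acc : PySem.Set (Int × Int) × Bool), acc.1.Nodup →
    (∃ t, (ds.foldl (pvStepB walls height width c) acc).1 = acc.1 ++ t) ∧
    (∀ x ∈ (ds.foldl (pvStepB walls height width c) acc).1, x ∈ acc.1 ∨
      ∃ d ∈ ds, x = (d.1 + c.1, d.2 + c.2) ∧ pvOkB wallCells height width x = true) ∧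
    (ds.foldl (pvStepB walls height width c) acc).1.Nodup ∧
    ((ds.foldl (pvStepB walls height width c) acc).2 = false →
      (ds.foldl (pvStepB walls height width c) acc).1 = acc.1 ∧ acc.2 = false ∧
      ∀ d ∈ ds, pvOkB wallCells height width (d.1 + c.1, d.2 + c.2) = true →
        (d.1 + c.1, d.2 + c.2) ∈ acc.1) ∧
    (acc.2 = false → (ds.foldl (pvStepB walls height width c) acc).2 = true →
      acc.1.length < (ds.foldl (pvStepB walls height width c) acc).1.length) ∧
    (acc.2 = true → (ds.foldl (pvStepB walls height width c) acc).2 = true) := by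
  intro ds
  induction ds with
  | nil =>
    intro acc hnd
    exact ⟨⟨[], by simp⟩, fun x hx => Or.inl hx, hnd, fun _ => ⟨rfl, by simp_all, by simp⟩,
      fun h1 h2 => by simp_all, fun h => h⟩
  | cons d ds ih =>
    intro acc hnd
    simp only [List.foldl_cons]
    have hstep : pvStepB walls height width c acc d =
        if pvOkB wallCells height width (d.1 + c.1, d.2 + c.2)
            && !(PySem.Set.contains acc.1 (d.1 + c.1, d.2 + c.2))
        then (PySem.Set.add acc.1 (d.1 + c.1, d.2 + c.2), true) else acc := by
      simp only [pvStepB, pvOkB, hw]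
      rfl
    rw [hstep]
    by_cases hc : (pvOkB wallCells height width (d.1 + c.1, d.2 + c.2)
        && !(PySem.Set.contains acc.1 (d.1 + c.1, d.2 + c.2))) = true
    · rw [if_pos hc]
      simp only [Bool.and_eq_true, Bool.not_eq_true'] at hc
      obtain ⟨hok, hmem⟩ := hc
      have hnmem : (d.1 + c.1, d.2 + c.2) ∉ acc.1 := by
        simpa using hmem
      have hadd : PySem.Set.add acc.1 (d.1 + c.1, d.2 + c.2) = acc.1 ++ [(d.1 + c.1, d.2 + c.2)] :=
        PySem.Set.add_of_not_mem hnmem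
      rw [hadd]
      have hnd1 : (acc.1 ++ [(d.1 + c.1, d.2 + c.2)]).Nodup := by
        rw [List.nodup_append']
        exact ⟨hnd, List.nodup_singleton _, by intro a ha hb; simp at hb; subst hb; exact hnmem ha⟩
      obtain ⟨⟨t, i1⟩, i2, i3, _i4, _i5, i6⟩ := ih (acc.1 ++ [(d.1 + c.1, d.2 + c.2)], true) hnd1
      refine ⟨⟨[(d.1 + c.1, d.2 + c.2)] ++ t, by simpa [List.append_assoc] using i1⟩, ?_, i3, ?_, ?_, ?_⟩
      · intro x hx
        rcases i2 x hx with hx' | ⟨d', hd', he, hok'⟩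
        · rcases List.mem_append.mp hx' with hx'' | hx''
          · exact Or.inl hx''
          · simp only [List.mem_singleton] at hx''; subst hx''
            exact Or.inr ⟨d, List.mem_cons_self, rfl, hok⟩
        · exact Or.inr ⟨d', List.mem_cons_of_mem _ hd', he, hok'⟩
      · intro hfalse
        exact absurd (i6 rfl) (by simp [hfalse])
      · intro _ _
        have : (acc.1 ++ [(d.1 + c.1, d.2 + c.2)]).length ≤
            (ds.foldl (pvStepB walls height width c) (acc.1 ++ [(d.1 + c.1, d.2 + c.2)], true)).1.length := by
          rw [i1]; simp
        simp only [List.length_append, List.length_singleton] at this ⊢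
        omega
      · intro _; exact i6 rfl
    · rw [if_neg hc]
      obtain ⟨i1, i2, i3, i4, i5, i6⟩ := ih acc hnd
      refine ⟨i1, ?_, i3, ?_, i5, i6⟩
      · intro x hx
        rcases i2 x hx with hx' | ⟨d', hd', he, hok'⟩
        · exact Or.inl hx'
        · exact Or.inr ⟨d', List.mem_cons_of_mem _ hd', he, hok'⟩
      · intro hfalse
        obtain ⟨j1, j2, j3⟩ := i4 hfalse
        refine ⟨j1, j2, ?_⟩
        intro d' hd' hok'
        rcases List.mem_cons.mp hd' with rfl | hd''
        · cases hm : PySem.Set.contains acc.1 (d'.1 + c.1, d'.2 + c.2) with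
          | true => simpa using hm
          | false =>
            have hnm : (d'.1 + c.1, d'.2 + c.2) ∉ acc.1 := by simpa using hm
            exact absurd (by simp [hok', hnm]) hc
        · exact j3 d' hd'' hok'

lemma pvSatPass_spec (walls : PySem.Set (Int × Int)) (wallCells : List (Int × Int))
    (height width : Int) (hw : ∀ n, PySem.Set.contains walls n = wallCells.contains n) :
    ∀ (ss : List (Int × Int)) (acc : PySem.Set (Int × Int) × Bool), acc.1.Nodup →
    (∃ t, (pvSatPass walls height width ss acc).1 = acc.1 ++ t) ∧
    (∀ x ∈ (pvSatPass walls height width ss acc).1, x ∈ acc.1 ∨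
      ∃ c ∈ ss, ∃ d ∈ pvDirs, x = (d.1 + c.1, d.2 + c.2) ∧ pvOkB wallCells height width x = true) ∧
    (pvSatPass walls height width ss acc).1.Nodup ∧
    ((pvSatPass walls height width ss acc).2 = false →
      (pvSatPass walls height width ss acc).1 = acc.1 ∧ acc.2 = false ∧
      ∀ c ∈ ss, ∀ d ∈ pvDirs, pvOkB wallCells height width (d.1 + c.1, d.2 + c.2) = true →
        (d.1 + c.1, d.2 + c.2) ∈ acc.1) ∧
    (acc.2 = false → (pvSatPass walls height width ss acc).2 = true →
      acc.1.length < (pvSatPass walls height width ss acc).1.length) ∧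
    (acc.2 = true → (pvSatPass walls height width ss acc).2 = true) := by
  intro ss
  induction ss with
  | nil =>
    intro acc hnd
    exact ⟨⟨[], by simp [pvSatPass]⟩, fun x hx => Or.inl hx, hnd,
      fun _ => ⟨rfl, by simp_all [pvSatPass], by simp⟩, fun h1 h2 => by simp_all [pvSatPass],
      fun h => h⟩
  | cons c ss ih =>
    intro acc hnd
    have hunf : pvSatPass walls height width (c :: ss) acc =
        pvSatPass walls height width ss (pvDirs.foldl (pvStepB walls height width c) acc) := rfl
    rw [hunf]
    obtain ⟨⟨t1, j1⟩, j2, j3, j4, j5, j6⟩ := pvSat_inner walls wallCells height width hw c pvDirs acc hnd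
    obtain ⟨⟨t2, k1⟩, k2, k3, k4, k5, k6⟩ :=
      ih (pvDirs.foldl (pvStepB walls height width c) acc) j3
    refine ⟨⟨t1 ++ t2, by rw [k1, j1, List.append_assoc]⟩, ?_, k3, ?_, ?_, ?_⟩
    · intro x hx
      rcases k2 x hx with hx' | ⟨c', hc', d', hd', he, hok⟩
      · rcases j2 x hx' with hx'' | ⟨d', hd', he, hok⟩
        · exact Or.inl hx''
        · exact Or.inr ⟨c, List.mem_cons_self, d', hd', he, hok⟩
      · exact Or.inr ⟨c', List.mem_cons_of_mem _ hc', d', hd', he, hok⟩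
    · intro hfalse
      obtain ⟨l1, l2, l3⟩ := k4 hfalse
      obtain ⟨m1, m2, m3⟩ := j4 l2
      refine ⟨by rw [l1, m1], m2, ?_⟩
      intro c' hc' d' hd' hok
      rcases List.mem_cons.mp hc' with rfl | hc''
      · exact m3 d' hd' hok
      · rw [← m1]; exact l3 c' hc'' d' hd' hok
    · intro hf ht
      cases hmid : (pvDirs.foldl (pvStepB walls height width c) acc).2 with
      | false =>
        have := k5 hmid ht
        obtain ⟨m1, _, _⟩ := j4 hmid
        rw [m1] at this
        exact this
      | true =>
        have h1 := j5 hf hmid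
        have h2 : (pvDirs.foldl (pvStepB walls height width c) acc).1.length ≤
            (pvSatPass walls height width ss (pvDirs.foldl (pvStepB walls height width c) acc)).1.length := by
          rw [k1]; simp
        omega
    · intro ht; exact k6 (j6 ht)

lemma pv_contains_ofList (wallCells : List (Int × Int)) (n : Int × Int) :
    PySem.Set.contains (PySem.Set.ofList wallCells) n = wallCells.contains n := by
  cases h : wallCells.contains n with
  | true =>
    simpa [PySem.Set.contains_iff, PySem.Set.mem_ofList] using List.contains_iff_mem.mp h
  | false =>
    have : n ∉ wallCells := by simpa using h
    simp [PySem.Set.contains_iff, PySem.Set.mem_ofList]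
    simpa using this

lemma pvSat_loop_spec (wallCells : List (Int × Int)) (height width : Int) (s : Int × Int) :
    ∀ (fuel : Nat) (reach : PySem.Set (Int × Int)),
    reach.Nodup →
    (∀ x ∈ reach, x ∈ pvS height width s) →
    (∀ x ∈ reach, pvReach wallCells height width s x) →
    s ∈ reach →
    (pvS height width s).card + 1 ≤ fuel + reach.length →
    (pvSatLoop (PySem.Set.ofList wallCells) height width fuel reach).Nodup ∧
    (∀ x, x ∈ pvSatLoop (PySem.Set.ofList wallCells) height width fuel reach ↔
      pvReach wallCells height width s x) := by
  intro fuel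
  induction fuel with
  | zero =>
    intro reach hnd hS _hR _hs hfuel
    exfalso
    have h1 : reach.length ≤ (pvS height width s).card := pv_len_le_card hnd hS
    omega
  | succ fuel ih =>
    intro reach hnd hS hR hs hfuel
    obtain ⟨⟨t, p1⟩, p2, p3, p4, p5, _p6⟩ :=
      pvSatPass_spec (PySem.Set.ofList wallCells) wallCells height width
        (pv_contains_ofList wallCells) reach (reach, false) hnd
    have hunf : pvSatLoop (PySem.Set.ofList wallCells) height width (fuel + 1) reach =
        if (pvSatPass (PySem.Set.ofList wallCells) height width reach (reach, false)).2 then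
          pvSatLoop (PySem.Set.ofList wallCells) height width fuel
            (pvSatPass (PySem.Set.ofList wallCells) height width reach (reach, false)).1
        else reach := rfl
    rw [hunf]
    cases hch : (pvSatPass (PySem.Set.ofList wallCells) height width reach (reach, false)).2 with
    | false =>
      rw [if_neg (by simp)]
      obtain ⟨q1, _q2, q3⟩ := p4 hch
      refine ⟨hnd, fun x => ⟨fun hx => hR x hx, fun hx => ?_⟩⟩
      induction hx with
      | base => exact hs
      | step hre hd hok ihx => exact q3 _ ihx _ hd hok
    | true =>
      rw [if_pos (by simp)]
      have hlen := p5 rfl hch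
      apply ih
      · exact p3
      · intro x hx
        rcases p2 x hx with hx' | ⟨c, _hc, d, _hd, he, hok⟩
        · exact hS x hx'
        · exact Finset.mem_insert_of_mem (pvOk_mem_grid hok)
      · intro x hx
        rcases p2 x hx with hx' | ⟨c, hc, d, hd, he, hok⟩
        · exact hR x hx'
        · subst he; exact pvReach.step (hR c hc) hd hok
      · rw [p1]; exact List.mem_append_left _ hs
      · simp only at hlen ⊢
        omega

-- ===== VERDICT (by name: the statement is the Claim_ definition above) =====
lemma pvCard_le_fuel (height width : Int) (s : Int × Int) :
    (pvS height width s).card + 1 ≤ height.toNat * width.toNat + 2 := by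
  have := pvS_card_le height width s
  omega

theorem isPathAvailable_spec : Claim_equal_isPathAvailable := by
  unfold Claim_equal_isPathAvailable
  intro emptyCells wallCells height width _dom hpre
  unfold Spec_isPathAvailable
  cases emptyCells with
  | nil => exact absurd rfl hpre
  | cons start tl =>
    obtain ⟨ndA, memA⟩ := pvBfs_loop_spec wallCells height width start
      (height.toNat * width.toNat + 2) [start] []
      (by simp)
      (by intro x hx; simp at hx; subst hx; exact Finset.mem_insert_self _ _)
      (by intro x hx; simp at hx; subst hx; exact pvReach.base)
      (by simp)
      (by simp)
      (by have := pvCard_le_fuel height width start; simpa using this)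
    obtain ⟨ndB, memB⟩ := pvSat_loop_spec wallCells height width start
      (height.toNat * width.toNat + 2) [start]
      (by simp)
      (by intro x hx; simp at hx; subst hx; exact Finset.mem_insert_self _ _)
      (by intro x hx; simp at hx; subst hx; exact pvReach.base)
      (by simp)
      (by have := pvCard_le_fuel height width start; simp; omega)
    have hmem : ∀ x, x ∈ pvBfsLoop wallCells height width (height.toNat * width.toNat + 2) [start] [] ↔
        x ∈ pvSatLoop (PySem.Set.ofList wallCells) height width (height.toNat * width.toNat + 2) [start] :=
      fun x => (memA x).trans (memB x).symm
    have hfin : (pvBfsLoop wallCells height width (height.toNat * width.toNat + 2) [start] []).toFinset =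
        (pvSatLoop (PySem.Set.ofList wallCells) height width (height.toNat * width.toNat + 2) [start]).toFinset :=
      Finset.ext (by simp [List.mem_toFinset, hmem])
    have hlen : (pvBfsLoop wallCells height width (height.toNat * width.toNat + 2) [start] []).length =
        (pvSatLoop (PySem.Set.ofList wallCells) height width (height.toNat * width.toNat + 2) [start]).length := by
      rw [← List.toFinset_card_of_nodup ndA, ← List.toFinset_card_of_nodup ndB, hfin]
    have hall : (pvBfsLoop wallCells height width (height.toNat * width.toNat + 2) [start] []).all
          (fun cell => (start :: tl).contains cell) =
        (pvSatLoop (PySem.Set.ofList wallCells) height width (height.toNat * width.toNat + 2) [start]).all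
          (fun cell => (start :: tl).contains cell) := by
      apply Bool.eq_iff_iff.mpr
      simp only [List.all_eq_true]
      exact ⟨fun h x hx => h x ((hmem x).mpr hx), fun h x hx => h x ((hmem x).mp hx)⟩
    show (if (pvBfsLoop wallCells height width (height.toNat * width.toNat + 2) [start] []).length ≠
            (start :: tl).length then false
          else (pvBfsLoop wallCells height width (height.toNat * width.toNat + 2) [start] []).all
            (fun cell => (start :: tl).contains cell)) =
        (decide ((start :: tl).length =
            (pvSatLoop (PySem.Set.ofList wallCells) height width (height.toNat * width.toNat + 2) [start]).length) &&
          (pvSatLoop (PySem.Set.ofList wallCells) height width (height.toNat * width.toNat + 2) [start]).all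
            (fun cell => (start :: tl).contains cell))
    rw [hlen, hall]
    by_cases hl : (pvSatLoop (PySem.Set.ofList wallCells) height width (height.toNat * width.toNat + 2) [start]).length =
        (start :: tl).length
    · rw [if_neg (by omega), hl]
      simp
    · rw [if_pos (by omega)]
      have : ¬ ((start :: tl).length =
          (pvSatLoop (PySem.Set.ofList wallCells) height width (height.toNat * width.toNat + 2) [start]).length) := by omega
      rw [decide_eq_false this, Bool.false_and]
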